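-- pv_equiv track=rewrite | github.com/alexandraback/datacollection | solutions_5636311922769920_0/Python/swmuron/d.py | keyEquation
-- ===== SOURCE A (Python) =====
-- def keyEquation(k,c,s):
--   if (s < k):
--     return ["IMPOSSIBLE"] # this is the hard case worth 20 lol
--
--   # we exploit the small set constraint of K = S
--   # in the expected manner. despite any value of C if S >= K then
--   # we can define the mathematical distribution of key tiles given K C
--   # where a tile perfectly reflects the state of an original sequence tile
--
--   ans = []
--
--   i = 0
--   xp = c-1
--   xpSum = 0
--   while(xp >= 0):
--     xpSum += k**xp
--     xp -= 1
--
--   index = 0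
--   while (i < k):
--     # ith thing
--     #
--     # the outer fan we want to get to is k**(c-1)*i+k**(c-2)*i...
--     #
--     # I visualize it like an arbitrary k-tree --- look at the problem name, after all
--     #
--     # we factored out the i and just precalculate xpSum once
--     #
--
--
--     ans.append(str(index+1))
--     index += xpSum
--     i += 1
--
--   return ans
-- ===== SOURCE B (Python) =====
-- def keyEquation(k, c, s):
--     if s < k:
--         return ["IMPOSSIBLE"]
--     n = max(c, 0)
--     step = n if k == 1 else (k**n - 1) // (k - 1)
--     return [str(1 + i * step) for i in range(k)]
-- ===== Notes on version B (the rewrite author's own statement) =====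
-- stated objective: simpler
-- what changed: Replaces the O(c) power-summation loop by the closed-form geometric sum (k^c-1)//(k-1) (with the k==1 special case) and the explicit while-loop/accumulator that builds the answer by a direct comprehension str(1+i*step) over range(k).
import Mathlib
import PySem

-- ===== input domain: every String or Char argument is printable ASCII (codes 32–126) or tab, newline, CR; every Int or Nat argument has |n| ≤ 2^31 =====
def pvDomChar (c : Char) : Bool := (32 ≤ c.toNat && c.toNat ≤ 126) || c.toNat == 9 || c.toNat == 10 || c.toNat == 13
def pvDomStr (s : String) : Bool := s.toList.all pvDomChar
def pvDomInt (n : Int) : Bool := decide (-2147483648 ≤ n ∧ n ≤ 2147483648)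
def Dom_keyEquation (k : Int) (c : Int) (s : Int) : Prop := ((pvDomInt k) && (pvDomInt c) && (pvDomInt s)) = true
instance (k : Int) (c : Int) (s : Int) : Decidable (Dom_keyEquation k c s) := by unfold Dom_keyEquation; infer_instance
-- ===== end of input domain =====

-- B replaces A's O(c) power-summation loop by the closed-form geometric sum and the
-- explicit append loop by a comprehension over range(k); same return value everywhere.

-- ===== PORT A =====
-- the 'while xp >= 0: xpSum += k**xp; xp -= 1' loop
def pvXpLoop (k : Int) (xp : Int) (acc : Int) : Int :=
  if _h : 0 ≤ xp then pvXpLoop k (xp - 1) (acc + k ^ xp.toNat) else acc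
termination_by (xp + 1).toNat
decreasing_by omega

-- the 'while i < k: ans.append(str(index+1)); index += xpSum; i += 1' loop
def pvBuildLoop (k xpSum : Int) (i index : Int) (ans : List String) : List String :=
  if _h : i < k then
    pvBuildLoop k xpSum (i + 1) (index + xpSum) (ans ++ [PySem.Int.toStr (index + 1)])
  else ans
termination_by (k - i).toNat
decreasing_by omega

def keyEquation (k : Int) (c : Int) (s : Int) : List String :=
  if s < k then ["IMPOSSIBLE"]
  else pvBuildLoop k (pvXpLoop k (c - 1) 0) 0 0 []

-- ===== PORT B =====
def keyEquation_alt (k : Int) (c : Int) (s : Int) : List String :=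
  if s < k then ["IMPOSSIBLE"]
  else
    let n : Int := max c 0
    let step : Int := if k == 1 then n else PySem.Int.floordiv (k ^ n.toNat - 1) (k - 1)
    (PySem.List.pyRange 0 k 1).map (fun i => PySem.Int.toStr (1 + i * step))

-- ===== PRECONDITION & SPEC =====
def Spec_keyEquation (k : Int) (c : Int) (s : Int) (out : List String) : Prop := out = keyEquation_alt k c s
instance (k : Int) (c : Int) (s : Int) (out : List String) : Decidable (Spec_keyEquation k c s out) := by unfold Spec_keyEquation; infer_instance

-- ===== CLAIM (what is proved, stated in full; the proofs are below) =====
def Claim_equal_keyEquation : Prop := ∀ (k : Int) (c : Int) (s : Int), Dom_keyEquation k c s → Spec_keyEquation k c s (keyEquation k c s)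

-- ===== LEMMAS AND PROOFS =====

lemma pvXpLoop_eq (k : Int) : ∀ (n : Nat) (xp : Int), (xp + 1).toNat = n →
    ∀ acc, pvXpLoop k xp acc = acc + ∑ j ∈ Finset.range n, k ^ j := by
  intro n
  induction n with
  | zero =>
    intro xp h acc
    unfold pvXpLoop
    have hxp : ¬ 0 ≤ xp := by omega
    simp [hxp]
  | succ m ih =>
    intro xp h acc
    unfold pvXpLoop
    have hxp : 0 ≤ xp := by omega
    rw [dif_pos hxp, ih (xp - 1) (by omega)]
    have hx : xp.toNat = m := by omega
    rw [Finset.sum_range_succ, hx]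
    ring

lemma pvBuildLoop_eq (k step : Int) : ∀ (n : Nat) (i : Int), (k - i).toNat = n →
    ∀ (index : Int) (ans : List String),
      pvBuildLoop k step i index ans =
        ans ++ (PySem.List.pyRange i k 1).map
          (fun j => PySem.Int.toStr (index + (j - i) * step + 1)) := by
  intro n
  induction n with
  | zero =>
    intro i h index ans
    unfold pvBuildLoop
    have hik : ¬ i < k := by omega
    simp [hik, PySem.List.pyRange_one_eq_nil (by omega : k ≤ i)]
  | succ m ih =>
    intro i h index ans
    unfold pvBuildLoop
    have hik : i < k := by omega
    rw [dif_pos hik, ih (i + 1) (by omega)]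
    rw [PySem.List.pyRange_one_cons hik]
    have hf : (fun j => PySem.Int.toStr (index + step + (j - (i + 1)) * step + 1)) =
        (fun j => PySem.Int.toStr (index + (j - i) * step + 1)) := by
      funext j; congr 1; ring
    simp [hf]

lemma pvXpSum_closed (k c : Int) :
    pvXpLoop k (c - 1) 0 =
      (if k == 1 then max c 0
       else PySem.Int.floordiv (k ^ (max c 0).toNat - 1) (k - 1)) := by
  rw [pvXpLoop_eq k (c.toNat) (c - 1) (by omega) 0]
  have hn : (max c 0).toNat = c.toNat := by omega
  by_cases hk : k = 1
  · simp [hk]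
  · have hne : (k == 1) = false := by simp [hk]
    rw [hne]
    simp only [hn]
    have hmul := geom_sum_mul k c.toNat
    have hb : k - 1 ≠ 0 := by omega
    have : k ^ c.toNat - 1 = (∑ j ∈ Finset.range c.toNat, k ^ j) * (k - 1) := hmul.symm
    rw [this]
    show 0 + _ = PySem.Int.floordiv _ _
    simp [PySem.Int.floordiv, Int.mul_fdiv_cancel _ hb]

-- ===== VERDICT (by name: the statement is the Claim_ definition above) =====
theorem keyEquation_spec : Claim_equal_keyEquation := by
  intro k c s _
  unfold Spec_keyEquation keyEquation keyEquation_alt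
  by_cases hs : s < k
  · simp [hs]
  · simp only [hs, if_false]
    rw [pvBuildLoop_eq k _ ((k : Int) - 0).toNat 0 rfl 0 [], pvXpSum_closed]
    simp only [List.nil_append]
    apply List.map_congr_left
    intro j _
    congr 1
    ring
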